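-- pv_equiv track=rewrite | github.com/AdamAndrei/algorithms-and-programming-course | lab 3/ALARM_CLOCK/L3 P3?.py | subsequence_three
-- ===== SOURCE A (Python) =====
-- def signature(n):
--     if abs(n) == n:
--         return True
--     else:
--         return False
--
-- def subsequence_three(list):
--     beststart = 0
--     bestcount = 0
--     curentstart = 0
--     curentcount = 0
--     for index in range(len(list) - 1):
--         if signature(list[index]) != signature(list[index + 1]):
--             curentcount += 1
--             if curentcount == 1:
--                 curentstart = index
--             if curentcount > bestcount:
--                 bestcount = curentcount
--                 beststart = curentstart
--         else:
--             curentcount = 0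
--     return list[beststart: beststart + bestcount + 1]
-- ===== SOURCE B (Python) =====
-- def subsequence_three(list):
--     if not list:
--         return []
--     dp = [1]
--     for i in range(1, len(list)):
--         if (list[i] >= 0) != (list[i - 1] >= 0):
--             dp.append(dp[i - 1] + 1)
--         else:
--             dp.append(1)
--     m = max(dp)
--     end = dp.index(m)
--     return list[end - m + 1:end + 1]
-- ===== Notes on version B (the rewrite author's own statement) =====
-- stated objective: alternative
-- what changed: Replaces A's single-pass running-best accumulator (beststart/bestcount/curentstart/curentcount updated per pair) with a dp table of alternating-run lengths ending at each index followed by a separate first-argmax pass that slices out the run.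
import Mathlib
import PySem

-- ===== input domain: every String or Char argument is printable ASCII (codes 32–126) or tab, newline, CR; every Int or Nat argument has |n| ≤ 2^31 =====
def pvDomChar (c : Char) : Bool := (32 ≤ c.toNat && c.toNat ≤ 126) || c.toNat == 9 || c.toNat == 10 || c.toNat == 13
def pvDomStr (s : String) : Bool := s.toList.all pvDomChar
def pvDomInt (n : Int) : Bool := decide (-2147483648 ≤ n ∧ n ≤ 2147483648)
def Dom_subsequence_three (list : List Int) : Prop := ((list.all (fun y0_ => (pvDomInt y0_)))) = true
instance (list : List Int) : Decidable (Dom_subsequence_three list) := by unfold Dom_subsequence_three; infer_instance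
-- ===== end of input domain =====

-- B rewrites A's running-best accumulator as a dp table of run lengths followed by a first-argmax pass (objective: alternative decomposition).

-- ===== PORT A =====
def signature (n : Int) : Bool := if |n| = n then true else false

def stepA (list : List Int) (st : Int × Int × Int × Int) (index : Nat) : Int × Int × Int × Int :=
  let (beststart, bestcount, curentstart, curentcount) := st
  if signature (list.getD index 0) ≠ signature (list.getD (index + 1) 0) then
    let curentcount' := curentcount + 1
    let curentstart' := if curentcount' = 1 then (index : Int) else curentstart
    if curentcount' > bestcount then (curentstart', curentcount', curentstart', curentcount')
    else (beststart, bestcount, curentstart', curentcount')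
  else (beststart, bestcount, curentstart, 0)

def subsequence_three (list : List Int) : List Int :=
  let s := (List.range (list.length - 1)).foldl (stepA list) (0, 0, 0, 0)
  PySem.List.slice list (some s.1) (some (s.1 + s.2.1 + 1))

-- ===== PORT B =====
def stepB (list : List Int) (dp : List Int) (i : Nat) : List Int :=
  if (decide (list.getD i 0 ≥ 0)) ≠ (decide (list.getD (i - 1) 0 ≥ 0)) then
    dp ++ [dp.getD (i - 1) 0 + 1]
  else dp ++ [1]

def subsequence_three_alt (list : List Int) : List Int :=
  if list.isEmpty then []
  else
    let dp := (List.range' 1 (list.length - 1)).foldl (stepB list) [1]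
    let m := (PySem.List.max? dp (fun x => x)).getD 0
    let e := (((PySem.List.index? dp m).getD 0 : Nat) : Int)
    PySem.List.slice list (some (e - m + 1)) (some (e + 1))

-- ===== PRECONDITION & SPEC =====
def Spec_subsequence_three (list : List Int) (out : List Int) : Prop := out = subsequence_three_alt list
instance (list : List Int) (out : List Int) : Decidable (Spec_subsequence_three list out) := by unfold Spec_subsequence_three; infer_instance

-- ===== CLAIM (what is proved, stated in full; the proofs are below) =====
def Claim_equal_subsequence_three : Prop := ∀ (list : List Int), Dom_subsequence_three list → Spec_subsequence_three list (subsequence_three list)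

-- ===== LEMMAS AND PROOFS =====

theorem sig_eq (n : Int) : signature n = decide (n ≥ 0) := by
  simp [signature, abs_eq_self, ge_iff_le]

theorem getD_append_len (dp : List Int) (x : Int) (n : Nat) (h : dp.length = n) :
    (dp ++ [x]).getD n 0 = x := by
  simp [List.getD, h]

-- Joint loop invariant relating A's accumulator after k pair-steps to B's dp table
-- over the first k+1 elements.
theorem joint_inv (list : List Int) (k : Nat) (hk : k ≤ list.length - 1) :
    ∀ s dp, (List.range k).foldl (stepA list) (0, 0, 0, 0) = s →
      (List.range' 1 k).foldl (stepB list) [1] = dp →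
    dp.length = k + 1 ∧
    0 ≤ s.2.2.2 ∧ s.2.2.2 ≤ (k : Int) ∧
    dp.getD k 0 = s.2.2.2 + 1 ∧
    (0 < s.2.2.2 → s.2.2.1 = (k : Int) - s.2.2.2) ∧
    0 ≤ s.2.1 ∧ s.2.1 ≤ (k : Int) ∧
    (∀ x ∈ dp, 1 ≤ x ∧ x ≤ s.2.1 + 1) ∧
    (∃ j : Nat, PySem.List.index? dp (s.2.1 + 1) = some j ∧ (j : Int) = s.1 + s.2.1) ∧
    0 ≤ s.1 := by
  induction k with
  | zero =>
    intro s dp hs hdp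
    simp only [List.range_zero, List.range'_zero, List.foldl_nil] at hs hdp
    subst hs hdp
    refine ⟨rfl, by decide, by decide, by decide, by decide, by decide, by decide, ?_,
      ⟨0, by decide, by decide⟩, by decide⟩
    intro x hx
    simp at hx
    subst hx
    exact ⟨by decide, by decide⟩
  | succ k ih =>
    intro s dp hs hdp
    have hk' : k ≤ list.length - 1 := by omega
    rcases hsk : (List.range k).foldl (stepA list) (0, 0, 0, 0) with ⟨bs, bc, cs, cc⟩
    obtain ⟨hlen, hcc0, hcck, hlast, hcs, hbc0, hbck, hbound, ⟨j, hj, hjv⟩, hbs0⟩ :=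
      ih hk' (bs, bc, cs, cc) _ hsk rfl
    dsimp only at hcc0 hcck hlast hcs hbc0 hbck hbound hj hjv hbs0
    set dpk := (List.range' 1 k).foldl (stepB list) [1] with hdpk
    have hmem : (bc + 1) ∈ dpk := by
      have := PySem.List.index?_isSome_iff (xs := dpk) (v := bc + 1)
      rw [hj] at this; simpa using this
    -- unfold one step of both folds
    have hrangeA : List.range (k + 1) = List.range k ++ [k] := List.range_succ
    have hrangeB : List.range' 1 (k + 1) = List.range' 1 k ++ [1 + k] := by
      have := List.range'_concat (s := 1) (n := k) (step := 1); simpa using this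
    rw [hrangeA, List.foldl_append, List.foldl_cons, List.foldl_nil, hsk] at hs
    rw [hrangeB, List.foldl_append, List.foldl_cons, List.foldl_nil, ← hdpk] at hdp
    have hBidx1 : 1 + k - 1 = k := by omega
    by_cases hcond : signature (list.getD k 0) = signature (list.getD (k + 1) 0)
    · -- same sign: A resets curentcount, B appends 1
      have hA : s = (bs, bc, cs, 0) := by
        rw [← hs]; simp only [stepA]; rw [if_neg (not_not_intro hcond)]
      have hBc : ¬ (decide (list.getD (1 + k) 0 ≥ 0) ≠ decide (list.getD (1 + k - 1) 0 ≥ 0)) := by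
        rw [hBidx1, show 1 + k = k + 1 by omega, ← sig_eq, ← sig_eq]
        exact not_not_intro hcond.symm
      have hB : dp = dpk ++ [1] := by
        rw [← hdp]; simp only [stepB]; rw [if_neg hBc]
      subst hA hB
      dsimp only
      refine ⟨by simp [hlen], le_refl 0, by positivity, ?_, by omega, hbc0, ?_, ?_,
        ⟨j, ?_, hjv⟩, hbs0⟩
      · exact getD_append_len _ _ _ hlen
      · push_cast; omega
      · intro x hx
        rcases List.mem_append.1 hx with h | h
        · exact hbound x h
        · simp at h; omega
      · rw [PySem.List.index?_append_of_mem _ hmem]; exact hj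
    · -- alternating: A extends the run, B appends last+1
      have hcs' : (if cc + 1 = 1 then (k : Int) else cs) = (k : Int) - cc := by
        by_cases h1 : cc + 1 = 1
        · rw [if_pos h1]; omega
        · rw [if_neg h1]; exact hcs (by omega)
      have hA : s = (if cc + 1 > bc
          then ((k : Int) - cc, cc + 1, (k : Int) - cc, cc + 1)
          else (bs, bc, (k : Int) - cc, cc + 1)) := by
        rw [← hs]; simp only [stepA]; rw [if_pos hcond, hcs']
      have hBc : (decide (list.getD (1 + k) 0 ≥ 0) ≠ decide (list.getD (1 + k - 1) 0 ≥ 0)) := by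
        rw [hBidx1, show 1 + k = k + 1 by omega, ← sig_eq, ← sig_eq]
        exact fun h => hcond h.symm
      have hB : dp = dpk ++ [cc + 1 + 1] := by
        rw [← hdp]; simp only [stepB]; rw [if_pos hBc, hBidx1, hlast]
      by_cases hgt : cc + 1 > bc
      · -- new best
        have hnotmem : (cc + 1 + 1) ∉ dpk := by
          intro hmem2
          have := (hbound _ hmem2).2; omega
        have hA' : s = ((k : Int) - cc, cc + 1, (k : Int) - cc, cc + 1) := by
          rw [hA, if_pos hgt]
        subst hA' hB
        dsimp only
        refine ⟨by simp [hlen], by omega, by push_cast; omega, ?_, ?_, by omega,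
          by push_cast; omega, ?_, ?_, by omega⟩
        · exact getD_append_len _ _ _ hlen
        · intro _; push_cast; ring
        · intro x hx
          rcases List.mem_append.1 hx with h | h
          · have := hbound x h; exact ⟨this.1, by omega⟩
          · simp at h; omega
        · refine ⟨k + 1, ?_, by push_cast; ring⟩
          rw [PySem.List.index?_append_singleton_self dpk _ hnotmem, hlen]
      · -- best unchanged
        have hA' : s = (bs, bc, (k : Int) - cc, cc + 1) := by rw [hA, if_neg hgt]
        subst hA' hB
        dsimp only
        refine ⟨by simp [hlen], by omega, by push_cast; omega, ?_, ?_, hbc0,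
          by push_cast; omega, ?_, ⟨j, ?_, hjv⟩, hbs0⟩
        · exact getD_append_len _ _ _ hlen
        · intro _; push_cast; ring
        · intro x hx
          rcases List.mem_append.1 hx with h | h
          · exact hbound x h
          · simp at h; omega
        · rw [PySem.List.index?_append_of_mem _ hmem]; exact hj

-- ===== VERDICT (by name: the statement is the Claim_ definition above) =====
theorem subsequence_three_spec : Claim_equal_subsequence_three := by
  intro list _
  unfold Spec_subsequence_three
  by_cases hnil : list = []
  · subst hnil; decide
  · have hn : 1 ≤ list.length := by
      cases list with
      | nil => exact absurd rfl hnil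
      | cons a t => simp
    obtain ⟨hlen, hcc0, hcck, hlast, hcs, hbc0, hbck, hbound, ⟨j, hj, hjv⟩, hbs0⟩ :=
      joint_inv list (list.length - 1) (le_refl _) _ _ rfl rfl
    set s := (List.range (list.length - 1)).foldl (stepA list) (0, 0, 0, 0) with hs
    set dp := (List.range' 1 (list.length - 1)).foldl (stepB list) [1] with hdp
    have hmem : (s.2.1 + 1) ∈ dp := by
      have := PySem.List.index?_isSome_iff (xs := dp) (v := s.2.1 + 1)
      rw [hj] at this; simpa using this
    have hne : dp ≠ [] := by intro h; rw [h] at hlen; simp at hlen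
    have hmax : PySem.List.max? dp (fun x => x) = some (s.2.1 + 1) := by
      cases hm : PySem.List.max? dp (fun x => x) with
      | none => exact absurd ((PySem.List.max?_eq_none_iff _ _).1 hm) hne
      | some mv =>
        have hmvmem := PySem.List.max?_mem hm
        have hmvmax := PySem.List.max?_isMax hm
        have h1 : mv ≤ s.2.1 + 1 := (hbound mv hmvmem).2
        have h2 : s.2.1 + 1 ≤ mv := hmvmax _ hmem
        rw [le_antisymm h1 h2]
    have hempty : list.isEmpty = false := by simpa using hnil
    show subsequence_three list = subsequence_three_alt list
    rw [subsequence_three, subsequence_three_alt, hempty]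
    simp only [Bool.false_eq_true, if_false, ← hs, ← hdp]
    rw [hmax]
    simp only [Option.getD_some]
    rw [hj]
    simp only [Option.getD_some]
    have e1 : (j : Int) - (s.2.1 + 1) + 1 = s.1 := by omega
    have e2 : (j : Int) + 1 = s.1 + s.2.1 + 1 := by omega
    rw [e1, e2]
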